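-- pv_equiv track=rewrite | github.com/j0eTheRipper/codewars | direction_reduction.py | cut_direction
-- ===== SOURCE A (Python) =====
-- corresponding_directions = {
--     ('NORTH', 'SOUTH'),
--     ('SOUTH', 'NORTH'),
--     ('EAST', 'WEST'),
--     ('WEST', 'EAST'),
-- }
--
-- def cut_direction(directions):
--     for i in range(1, len(directions)):
--         x = directions[i], directions[i - 1]
--         if x in corresponding_directions:
--             directions[i], directions[i - 1] = None, None
--         elif None in x:
--             continue
--
--     new_directions = [direction for direction in directions if direction is not None]
--
--     if validate(new_directions):
--         return cut_direction(new_directions)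
--     else:
--         return new_directions
--
-- def validate(directions: list):
--     for i in range(1, len(directions)):
--         x = directions[i], directions[i - 1]
--         if x in corresponding_directions:
--             return True
--     else:
--         return False
-- ===== SOURCE B (Python) =====
-- corresponding_directions = {
--     ('NORTH', 'SOUTH'),
--     ('SOUTH', 'NORTH'),
--     ('EAST', 'WEST'),
--     ('WEST', 'EAST'),
-- }
--
-- def cut_direction(directions):
--     stack = []
--     for d in directions:
--         if stack and (d, stack[-1]) in corresponding_directions:
--             stack.pop()
--         else:
--             stack.append(d)
--     return stack
-- ===== Notes on version B (the rewrite author's own statement) =====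
-- stated objective: faster
-- what changed: Replaced A's repeated cancel-a-pass-then-recurse scheme (each round rescans the whole list, Nones it, filters and validates) by a single left-to-right stack pass that pops the top when the next direction opposes it.
import Mathlib
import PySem

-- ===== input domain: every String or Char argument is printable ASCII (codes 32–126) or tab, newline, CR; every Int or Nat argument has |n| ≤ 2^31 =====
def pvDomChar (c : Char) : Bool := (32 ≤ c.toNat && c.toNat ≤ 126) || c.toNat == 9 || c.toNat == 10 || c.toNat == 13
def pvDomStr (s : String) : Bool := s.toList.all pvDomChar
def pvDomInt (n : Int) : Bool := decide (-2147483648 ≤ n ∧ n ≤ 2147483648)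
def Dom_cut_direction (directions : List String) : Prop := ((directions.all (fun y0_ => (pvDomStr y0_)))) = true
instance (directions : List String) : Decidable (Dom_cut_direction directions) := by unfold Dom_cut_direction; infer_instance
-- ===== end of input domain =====

-- B replaces A's repeated cancel-pass-then-recurse (O(n^2)) by a single stack pass (O(n));
-- equivalence is about the RETURN value only: Python A mutates its argument in place
-- (overwrites cancelled entries with None), B does not.

-- ===== PORT A =====
def corresponding : List (String × String) :=
  [("NORTH","SOUTH"), ("SOUTH","NORTH"), ("EAST","WEST"), ("WEST","EAST")]

def opp (a b : String) : Bool := corresponding.contains (a, b)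

-- Python helper `validate`: scans indices 1..len-1 checking (d[i], d[i-1]);
-- rendered as structural recursion over adjacent pairs (same pairs, same order, early exit).
def validate : List String → Bool
  | a :: b :: t => opp b a || validate (b :: t)
  | _ => false

-- One step of A's in-place cancelling loop. At step i Python reads the ORIGINAL d[i] and the
-- possibly-already-None'd d[i-1]; the loop is therefore exactly a left fold carrying the
-- processed prefix (reversed): cancel with the top if it is a non-None opposite, else append.
def passStep (acc : List (Option String)) (d : String) : List (Option String) :=
  match acc with
  | some p :: t => if opp d p then none :: none :: t else some d :: acc
  | _ => some d :: acc

-- A's pass followed by the `is not None` comprehension.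
def newList (l : List String) : List String :=
  ((l.foldl passStep []).reverse).filterMap id

-- ---- helpers cited by cut_direction's termination proof (used again in the proofs below) ----
def cancel : List String → List String
  | [] => []
  | [a] => [a]
  | a :: b :: t => if opp b a then cancel t else a :: cancel (b :: t)

lemma g_spec (l : List String) :
    (∀ (acc : List (Option String)) (d : String),
        ((List.foldl passStep (some d :: acc) l).reverse).filterMap id
          = (acc.reverse).filterMap id ++ cancel (d :: l)) ∧
    (∀ (acc : List (Option String)),
        ((List.foldl passStep (none :: none :: acc) l).reverse).filterMap id
          = (acc.reverse).filterMap id ++ cancel l) := by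
  induction l with
  | nil => constructor <;> intros <;> simp [cancel]
  | cons e t ih =>
    constructor
    · intro acc d
      by_cases h : opp e d = true
      · simp only [List.foldl_cons, passStep, h, if_pos]
        rw [ih.2 acc]
        simp [cancel, h]
      · simp only [List.foldl_cons, passStep, h, if_neg, Bool.not_eq_true]
        rw [ih.1 (some d :: acc) e]
        simp [cancel, h]
      -- note: passStep (some d :: acc) e matches the first branch
    · intro acc
      simp only [List.foldl_cons, passStep]
      rw [ih.1 (none :: none :: acc) e]
      simp

lemma newList_eq_cancel (l : List String) : newList l = cancel l := by
  cases l with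
  | nil => rfl
  | cons d t =>
    unfold newList
    simp only [List.foldl_cons, passStep]
    have := (g_spec t).1 [] d
    simpa using this

lemma length_cancel_le (l : List String) : (cancel l).length ≤ l.length := by
  induction l using cancel.induct with
  | case1 => simp [cancel]
  | case2 a => simp [cancel]
  | case3 a b t h ih => simp [cancel, h]; omega
  | case4 a b t h ih => simp [cancel, h] at ih ⊢; omega

lemma cancel_lt_of_validate (l : List String) (hv : validate l = true) :
    (cancel l).length < l.length := by
  induction l using cancel.induct with
  | case1 => simp [validate] at hv
  | case2 a => simp [validate] at hv
  | case3 a b t h ih =>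
    have := length_cancel_le t
    simp [cancel, h]; omega
  | case4 a b t h ih =>
    have hv' : validate (b :: t) = true := by
      simpa [validate, h] using hv
    have := ih hv'
    simp [cancel, h] at this ⊢; omega

lemma cancel_of_validate_false (l : List String) (hv : validate l = false) :
    cancel l = l := by
  induction l using cancel.induct with
  | case1 => rfl
  | case2 a => rfl
  | case3 a b t h ih => simp [validate, h] at hv
  | case4 a b t h ih =>
    have hv' : validate (b :: t) = false := by
      simpa [validate, h] using hv
    simp [cancel, h, ih hv']

lemma newList_lt (l : List String) (h : validate (newList l) = true) :
    (newList l).length < l.length := by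
  rw [newList_eq_cancel] at h ⊢
  by_cases hv : validate l = true
  · exact cancel_lt_of_validate l hv
  · rw [cancel_of_validate_false l (by simpa using hv)] at h
    exact absurd h (by simpa using hv)

def cut_direction (directions : List String) : List String :=
  if hvv : validate (newList directions) = true then
    cut_direction (newList directions)
  else
    newList directions
termination_by directions.length
decreasing_by exact newList_lt directions hvv

-- ===== PORT B =====
def push (s : List String) (d : String) : List String :=
  match s with
  | t :: r => if opp d t then r else d :: t :: r
  | [] => [d]

def cut_direction_alt (directions : List String) : List String :=
  (directions.foldl push []).reverse

-- ===== PRECONDITION & SPEC =====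
def Spec_cut_direction (directions : List String) (out : List String) : Prop := out = cut_direction_alt directions
instance (directions : List String) (out : List String) : Decidable (Spec_cut_direction directions out) := by unfold Spec_cut_direction; infer_instance

-- ===== CLAIM (what is proved, stated in full; the proofs are below) =====
def Claim_equal_cut_direction : Prop := ∀ (directions : List String), Dom_cut_direction directions → Spec_cut_direction directions (cut_direction directions)

-- ===== LEMMAS AND PROOFS =====

-- the stack never contains two adjacent opposite directions
def redB : List String → Bool
  | a :: b :: t => !opp a b && redB (b :: t)
  | _ => true

lemma opp_elim (a b : String) (h : opp a b = true) :
    (a = "NORTH" ∧ b = "SOUTH") ∨ (a = "SOUTH" ∧ b = "NORTH") ∨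
    (a = "EAST" ∧ b = "WEST") ∨ (a = "WEST" ∧ b = "EAST") := by
  simp [opp, corresponding, List.contains_eq_mem, Prod.ext_iff] at h
  tauto

lemma opp_symm (a b : String) (h : opp a b = true) : opp b a = true := by
  rcases opp_elim a b h with ⟨h1, h2⟩ | ⟨h1, h2⟩ | ⟨h1, h2⟩ | ⟨h1, h2⟩ <;>
    subst h1 <;> subst h2 <;> decide

lemma opp_unique (a h b : String) (h1 : opp a h = true) (h2 : opp a b = true) : h = b := by
  rcases opp_elim a h h1 with ⟨x1, y1⟩ | ⟨x1, y1⟩ | ⟨x1, y1⟩ | ⟨x1, y1⟩ <;>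
    rcases opp_elim a b h2 with ⟨x2, y2⟩ | ⟨x2, y2⟩ | ⟨x2, y2⟩ | ⟨x2, y2⟩ <;>
      simp_all

lemma redB_tail (h : String) (r : List String) (hr : redB (h :: r) = true) : redB r = true := by
  cases r with
  | nil => rfl
  | cons h2 r2 => simp [redB] at hr; simp [hr]

lemma redB_push (s : List String) (d : String) (hs : redB s = true) : redB (push s d) = true := by
  cases s with
  | nil => rfl
  | cons h r =>
    by_cases hd : opp d h = true
    · simp only [push, hd, if_pos]; exact redB_tail h r hs
    · simp only [push, hd, if_neg, Bool.not_eq_true]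
      simp [redB] at hs ⊢
      cases r with
      | nil => simpa [redB] using hd
      | cons h2 r2 => simp [redB] at hs ⊢; simp_all

lemma push_push (s : List String) (a b : String) (hab : opp b a = true)
    (hs : redB s = true) : push (push s a) b = s := by
  cases s with
  | nil => simp [push, hab]
  | cons h r =>
    by_cases hah : opp a h = true
    · have hb : h = b := opp_unique a h b hah (opp_symm b a hab)
      subst hb
      simp only [push, hah, if_pos]
      cases r with
      | nil => simp
      | cons h2 r2 =>
        simp [redB] at hs
        simp [hs.1]
    · simp [push, hah, hab]

lemma foldl_push_reduced (l : List String) : ∀ (s : List String), redB s = true →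
    validate l = false →
    (match l, s with
     | a :: _, h :: _ => opp a h = false
     | _, _ => True) →
    List.foldl push s l = l.reverse ++ s := by
  induction l with
  | nil => intro s _ _ _; simp
  | cons a t ih =>
    intro s hs hv hc
    have hstep : push s a = a :: s := by
      cases s with
      | nil => rfl
      | cons h r => simp at hc; simp [push, hc]
    rw [List.foldl_cons, hstep]
    have hs' : redB (a :: s) = true := by
      cases s with
      | nil => rfl
      | cons h r => simp at hc; simp [redB, hc]; exact hs
    cases t with
    | nil => simp
    | cons b t2 =>
      simp only [validate, Bool.or_eq_false_iff] at hv
      have := ih (a :: s) hs' hv.2 (by simpa using hv.1)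
      rw [this]; simp

lemma foldl_push_cancel_eq (l : List String) : ∀ (s : List String), redB s = true →
    List.foldl push s (cancel l) = List.foldl push s l := by
  induction l using cancel.induct with
  | case1 => intro s _; rfl
  | case2 a => intro s _; rfl
  | case3 a b t h ih =>
    intro s hs
    simp only [cancel, h, if_pos]
    rw [ih s hs]
    simp only [List.foldl_cons]
    rw [push_push s a b h hs]
  | case4 a b t h ih =>
    intro s hs
    simp only [cancel, h, if_neg, Bool.not_eq_true]
    rw [List.foldl_cons, List.foldl_cons, ih (push s a) (redB_push s a hs)]

lemma alt_newList (l : List String) : cut_direction_alt (newList l) = cut_direction_alt l := by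
  rw [newList_eq_cancel]
  unfold cut_direction_alt
  rw [foldl_push_cancel_eq l [] rfl]

lemma alt_of_validate_false (l : List String) (hv : validate l = false) :
    cut_direction_alt l = l := by
  unfold cut_direction_alt
  rw [foldl_push_reduced l [] rfl hv (by cases l <;> trivial)]
  simp

lemma main_aux (n : Nat) : ∀ (l : List String), l.length < n →
    cut_direction l = cut_direction_alt l := by
  induction n with
  | zero => intro l hl; omega
  | succ n ih =>
    intro l hl
    rw [cut_direction]
    by_cases h : validate (newList l) = true
    · rw [dif_pos h]
      have hlt := newList_lt l h
      rw [ih (newList l) (by omega)]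
      exact alt_newList l
    · rw [dif_neg h]
      rw [← alt_newList l]
      exact (alt_of_validate_false (newList l) (by simpa using h)).symm

-- ===== VERDICT (by name: the statement is the Claim_ definition above) =====
theorem cut_direction_spec : Claim_equal_cut_direction := by
  intro directions _
  unfold Spec_cut_direction
  exact main_aux (directions.length + 1) directions (by omega)
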